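-- pv_equiv track=rewrite | github.com/rwbogl/GerryChain | rundmcmc/benchmark_tests.py | dictionary_to_nodes
-- ===== SOURCE A (Python) =====
-- def dictionary_to_nodes(dictionary):
--     #Takes dictionary stored partition and returns the list of nodes format
--     node_lists = []
--     keylist = dictionary.keys()
--     for i in set(dictionary.values()):
--         node_list = []
--         for x in keylist:
--             if dictionary[x] == i:
--                 node_list.append(x)
--         node_lists.append(frozenset(node_list))
--     return set(node_lists)
-- ===== SOURCE B (Python) =====
-- def dictionary_to_nodes(dictionary):
--     # One pass over items building a value -> [keys] table, then emit the buckets.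
--     groups = {}
--     for key, value in dictionary.items():
--         groups.setdefault(value, []).append(key)
--     return set(frozenset(keys) for keys in groups.values())
-- ===== Notes on version B (the rewrite author's own statement) =====
-- stated objective: simpler
-- what changed: Replaces the nested scan (outer loop over distinct values, inner rescan of all keys per value) by a single pass over items() that builds a value->keys table, then emits the table's buckets.
import Mathlib
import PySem

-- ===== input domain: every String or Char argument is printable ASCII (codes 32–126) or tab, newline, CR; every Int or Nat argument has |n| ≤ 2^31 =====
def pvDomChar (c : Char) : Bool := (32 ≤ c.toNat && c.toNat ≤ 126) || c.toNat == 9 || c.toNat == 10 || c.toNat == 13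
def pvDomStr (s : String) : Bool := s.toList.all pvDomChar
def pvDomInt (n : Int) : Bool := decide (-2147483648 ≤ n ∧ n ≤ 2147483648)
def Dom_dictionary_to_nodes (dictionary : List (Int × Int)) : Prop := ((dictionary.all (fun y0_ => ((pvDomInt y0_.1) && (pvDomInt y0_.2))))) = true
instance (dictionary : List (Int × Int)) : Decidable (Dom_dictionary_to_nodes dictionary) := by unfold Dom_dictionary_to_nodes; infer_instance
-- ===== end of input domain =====

-- B groups keys by value in one items() pass instead of A's per-value rescan of all keys (simpler; same result).

-- ===== PORT A =====
-- A, step for step: keylist = dictionary.keys(); for i in set(dictionary.values()):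
--   inner scan over keylist collecting x with dictionary[x] == i; frozenset it; outer set of the results.
-- dictionary[x] is ported as Dict.getD _ x 0, exact here because x always ranges over the dict's keys.
def dictionary_to_nodes (dictionary : List (Int × Int)) : List (List Int) :=
  let d := PySem.Dict.mk dictionary
  let keylist := PySem.Dict.keys d
  let node_lists :=
    (PySem.Set.ofList (PySem.Dict.values d)).foldl
      (fun acc i =>
        acc ++ [PySem.Set.ofList
          (keylist.foldl (fun nl x => if PySem.Dict.getD d x 0 == i then nl ++ [x] else nl) [])])
      []
  PySem.Set.ofList node_lists

-- ===== PORT B =====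
-- Source B, step for step: groups = {}; for key, value in items: groups.setdefault(value, []).append(key)
-- (= modify value [] (· ++ [key])); then set(frozenset(keys) for keys in groups.values()).
def dictionary_to_nodes_alt (dictionary : List (Int × Int)) : List (List Int) :=
  let groups :=
    dictionary.foldl
      (fun (g : PySem.Dict Int (List Int)) kv => g.modify kv.2 [] (· ++ [kv.1]))
      PySem.Dict.empty
  PySem.Set.ofList ((PySem.Dict.values groups).map (fun ks => PySem.Set.ofList ks))

-- ===== PRECONDITION & SPEC =====
-- A Python dict cannot contain duplicate keys, so association lists with duplicate keys encode
-- no input of A; Pre_ restricts to the lists that do encode dicts (it excludes no Python input).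
def Pre_dictionary_to_nodes (dictionary : List (Int × Int)) : Prop :=
  (dictionary.map Prod.fst).Nodup
instance (dictionary : List (Int × Int)) : Decidable (Pre_dictionary_to_nodes dictionary) := by
  unfold Pre_dictionary_to_nodes; infer_instance

def pvWitness_dictionary_to_nodes : (List (Int × Int)) := [(1, 2), (3, 2), (4, 5)]

def Spec_dictionary_to_nodes (dictionary : List (Int × Int)) (out : List (List Int)) : Prop := out = dictionary_to_nodes_alt dictionary
instance (dictionary : List (Int × Int)) (out : List (List Int)) : Decidable (Spec_dictionary_to_nodes dictionary out) := by unfold Spec_dictionary_to_nodes; infer_instance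

-- ===== CLAIM (what is proved, stated in full; the proofs are below) =====
def Claim_equal_dictionary_to_nodes : Prop := ∀ (dictionary : List (Int × Int)), Dom_dictionary_to_nodes dictionary → Pre_dictionary_to_nodes dictionary → Spec_dictionary_to_nodes dictionary (dictionary_to_nodes dictionary)

-- ===== LEMMAS AND PROOFS =====

-- ===== VERDICT (by name: the statement is the Claim_ definition above) =====
theorem dictionary_to_nodes_spec : Claim_equal_dictionary_to_nodes := by
  intro d _ hpre
  show dictionary_to_nodes d = dictionary_to_nodes_alt d
  have hnd : (PySem.Dict.mk d).keys.Nodup := by simpa [PySem.Dict.keys_mk] using hpre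
  simp only [dictionary_to_nodes, dictionary_to_nodes_alt]
  have hGnd : (d.foldl (fun (g : PySem.Dict Int (List Int)) kv => g.modify kv.2 [] (· ++ [kv.1]))
      PySem.Dict.empty).keys.Nodup :=
    PySem.Dict.nodup_keys_foldl_modify_key d (fun kv => kv.2) [] (fun g kv => (· ++ [kv.1]))
      PySem.Dict.empty PySem.Dict.nodup_keys_empty
  rw [PySem.Dict.values_eq_map_keys _ hGnd []]
  rw [PySem.Dict.keys_foldl_modify_key d (fun kv => kv.2) [] (fun g kv => (· ++ [kv.1]))
      PySem.Dict.empty]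
  have hBucket : ∀ i : Int,
      (d.foldl (fun (g : PySem.Dict Int (List Int)) kv => g.modify kv.2 [] (· ++ [kv.1]))
        PySem.Dict.empty).getD i []
      = (d.filter (fun kv => kv.2 == i)).map (fun kv => kv.1) := by
    intro i
    have hfm : (d.foldl (fun (g : PySem.Dict Int (List Int)) kv => g.modify kv.2 [] (· ++ [kv.1]))
        PySem.Dict.empty)
        = ((d.map (fun kv => (kv.2, kv.1))).foldl
            (fun (g : PySem.Dict Int (List Int)) p => g.modify p.1 [] (· ++ [p.2]))
            PySem.Dict.empty) := by
      rw [List.foldl_map]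
    rw [hfm, PySem.Dict.getD_foldl_modify_append]
    simp [List.filter_map, List.map_map, Function.comp_def]
  simp only [hBucket, PySem.List.foldl_append_if, PySem.List.foldl_append_singleton_eq_map,
    List.nil_append, PySem.Dict.keys_mk, PySem.Dict.values_mk, PySem.Dict.keys_empty,
    PySem.Set.update_nil_left, List.map_map]
  congr 1
  apply List.map_congr_left
  intro i hi
  have h2 : ∀ kv ∈ d,
      ((fun x => ((PySem.Dict.mk d).getD x 0 == i)) ∘ (fun kv : Int × Int => kv.1)) kv
        = (fun kv : Int × Int => kv.2 == i) kv := by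
    intro kv hkv
    have h3 : (PySem.Dict.mk d).getD kv.1 0 = kv.2 :=
      PySem.Dict.getD_of_mem_items _ (by simpa using hkv) hnd 0
    simp [h3]
  rw [List.filter_map, List.filter_congr h2]
  simp [List.map_map, Function.comp_def]
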